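-- pv_equiv track=rewrite | github.com/AmishaPanda7353/takeda_dev_ipro | src/query_insights/sql_generator/text_to_query_generator.py | split_query_at_select
-- ===== SOURCE A (Python) =====
-- def split_query_at_select(query: str) -> str:
--     query_upper = (
--         query.upper()
--     )  # Convert the query to uppercase to make it case-insensitive
--     select_keyword = "SELECT"
--     select_positions = []
--
--     # Find positions of each "SELECT" keyword in the query
--     pos = query_upper.find(select_keyword)
--     while pos != -1:
--         select_positions.append(pos)
--         pos = query_upper.find(select_keyword, pos + len(select_keyword))
--
--     # Split the query at each "SELECT" position
--     split_parts = []
--     previous_position = 0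
--
--     for pos in select_positions:
--         if previous_position < pos:
--             split_parts.append(query[previous_position:pos].strip())
--         previous_position = pos
--
--     # Append the final part after the last SELECT
--     if previous_position < len(query):
--         split_parts.append(query[previous_position:].strip())
--
--     return split_parts
-- ===== SOURCE B (Python) =====
-- import re
--
--
-- def split_query_at_select(query: str) -> str:
--     # Split before each case-insensitive occurrence of SELECT, in one regex pass.
--     parts = re.split(r'(?=SELECT)', query, flags=re.I)
--     result = [p.strip() for p in parts]
--     # re.split always yields a leading chunk; it is '' exactly when the query
--     # starts right at a SELECT (or is empty), and that chunk is never emitted.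
--     if parts[0] == '':
--         result = result[1:]
--     return result
-- ===== Notes on version B (the rewrite author's own statement) =====
-- stated objective: idiomatic
-- what changed: Replaces the manual find-positions loop plus a second slicing pass with a single regex split before each case-insensitive SELECT, a strip comprehension, and one drop of the empty leading chunk.
import Mathlib
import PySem

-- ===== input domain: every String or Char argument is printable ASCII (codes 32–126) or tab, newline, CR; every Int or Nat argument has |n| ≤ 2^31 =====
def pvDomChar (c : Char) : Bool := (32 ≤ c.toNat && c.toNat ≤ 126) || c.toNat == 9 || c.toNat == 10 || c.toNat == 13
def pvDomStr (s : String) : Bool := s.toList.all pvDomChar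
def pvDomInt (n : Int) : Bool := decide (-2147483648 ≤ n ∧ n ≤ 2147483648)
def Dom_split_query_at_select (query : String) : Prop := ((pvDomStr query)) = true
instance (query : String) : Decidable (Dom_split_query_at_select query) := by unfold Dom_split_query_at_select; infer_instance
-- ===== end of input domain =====

-- B replaces A's find-positions loop plus second slicing pass by a single scan that
-- splits before each case-insensitive SELECT (a regex split in Python), strips each
-- piece and drops the empty leading chunk; same result, different decomposition.

-- ===== PORT A =====

-- "SELECT"
def pvSelKw : List Char := ['S', 'E', 'L', 'E', 'C', 'T']

-- termination fact for A's while-loop: a start index past the end finds nothing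
theorem pvFindFrom_past_len (s sub : List Char) (k : Nat) (h : s.length < k) :
    PySem.Chars.findFrom s sub (k : Int) = -1 := by
  have hk0 : ¬ ((k : Int) < 0) := by omega
  have hlt : (s.length : Int) < (k : Int) := by exact_mod_cast h
  simp [PySem.Chars.findFrom, hk0, hlt]

-- `pos = q.find(kw); while pos != -1: positions.append(pos); pos = q.find(kw, pos+6)`
def pvPositionsA (qu : List Char) (start : Nat) : List Int :=
  let pos := PySem.Chars.findFrom qu pvSelKw (start : Int) none
  if h : pos = -1 then [] else pos :: pvPositionsA qu (pos.toNat + 6)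
  termination_by qu.length + 1 - start
  decreasing_by
    have hle : start ≤ qu.length := by
      by_contra hgt
      exact h (pvFindFrom_past_len qu pvSelKw start (by omega))
    obtain ⟨h1, -, -⟩ := PySem.Chars.findFrom_natCast_spec qu pvSelKw start hle h
    omega

-- `for pos in select_positions: if previous_position < pos: parts.append(q[prev:pos].strip()); previous_position = pos`
def pvLoopA (q : List Char) : List Int → List (List Char) → Int → List (List Char) × Int
  | [], acc, prev => (acc, prev)
  | pos :: rest, acc, prev =>
      pvLoopA q rest
        (if prev < pos then acc ++ [PySem.Chars.strip (PySem.Chars.slice q (some prev) (some pos))] else acc)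
        pos

def pvSplitACore (q : List Char) : List (List Char) :=
  let qu := PySem.Chars.upper q
  let positions := pvPositionsA qu 0
  let st := pvLoopA q positions [] 0
  if st.2 < PySem.Chars.len q
  then st.1 ++ [PySem.Chars.strip (PySem.Chars.slice q (some st.2) none)]
  else st.1

def split_query_at_select (query : String) : List String :=
  (pvSplitACore query.toList).map String.ofList

-- ===== PORT B =====

-- "SELECT", B's own copy of the pattern
def pvSelKwB : List Char := ['S', 'E', 'L', 'E', 'C', 'T']

-- the regex lookahead `(?=SELECT)` with re.I: does a case-insensitive SELECT start here?
def pvSelAt (rest : List Char) : Bool := (rest.take 6).map PySem.Chars.upperChar == pvSelKwB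

-- hand port of `re.split(r'(?=SELECT)', query, flags=re.I)` (exact: the regex engine
-- scans left to right and cuts before every position where the lookahead matches)
def pvScanB (rest cur : List Char) : List (List Char) :=
  match rest with
  | [] => [cur.reverse]
  | c :: rs => if pvSelAt (c :: rs) then cur.reverse :: pvScanB rs [c] else pvScanB rs (c :: cur)

def split_query_at_select_alt (query : String) : List String :=
  let parts := pvScanB query.toList []
  let result := parts.map (fun p => String.ofList (PySem.Chars.strip p))
  if parts.head? = some [] then result.tail else result

-- ===== PRECONDITION & SPEC =====
def Spec_split_query_at_select (query : String) (out : List String) : Prop := out = split_query_at_select_alt query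
instance (query : String) (out : List String) : Decidable (Spec_split_query_at_select query out) := by unfold Spec_split_query_at_select; infer_instance

-- ===== CLAIM (what is proved, stated in full; the proofs are below) =====
def Claim_equal_split_query_at_select : Prop := ∀ (query : String), Dom_split_query_at_select query → Spec_split_query_at_select query (split_query_at_select query)

-- ===== LEMMAS AND PROOFS =====

-- all positions where a case-insensitive SELECT starts
def pvAllPos (q : List Char) : List Nat :=
  (List.range q.length).filter (fun i => pvSelAt (q.drop i))

-- the raw pieces of q cut before each (absolute, sorted) position in ps, from prev on
def pvCutFrom (q : List Char) (prev : Nat) : List Nat → List (List Char)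
  | [] => [q.drop prev]
  | p :: ps => (q.drop prev).take (p - prev) :: pvCutFrom q p ps

-- B's matcher at i is exactly "pvSelKw is a prefix of (upper q).drop i"
theorem pvSelAt_iff (q : List Char) (i : Nat) :
    pvSelAt (q.drop i) = true ↔ pvSelKw <+: (PySem.Chars.upper q).drop i := by
  have h : (PySem.Chars.upper q).drop i = (q.drop i).map PySem.Chars.upperChar := by
    simp [PySem.Chars.upper, List.map_drop]
  rw [h, List.prefix_iff_eq_take]
  have h2 : List.take pvSelKw.length ((q.drop i).map PySem.Chars.upperChar)
      = ((q.drop i).take 6).map PySem.Chars.upperChar := by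
    simp [pvSelKw, List.map_take]
  rw [h2]
  simp only [pvSelAt, beq_iff_eq, show pvSelKwB = pvSelKw from rfl]
  exact ⟨fun e => e.symm, fun e => e.symm⟩

theorem pvAllPos_lt (q : List Char) {p : Nat} (h : p ∈ pvAllPos q) : p < q.length := by
  simp only [pvAllPos, List.mem_filter, List.mem_range] at h
  exact h.1

theorem pvAllPos_pairwise (q : List Char) : (pvAllPos q).Pairwise (· < ·) := by
  exact List.Pairwise.filter _ List.pairwise_lt_range

-- no two SELECT occurrences overlap
theorem pvNoOverlap (u : List Char) {p r : Nat} (hp : pvSelKw <+: u.drop p)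
    (hr : pvSelKw <+: u.drop r) (h1 : p < r) (h2 : r < p + 6) : False := by
  have hlr : 6 ≤ u.length - r := by simpa [pvSelKw] using hr.length_le
  have e1 := hp.getElem (i := r - p) (by simp [pvSelKw]; omega)
  have e2 := hr.getElem (i := 0) (by simp [pvSelKw])
  rw [List.getElem_drop] at e1 e2
  simp only [show p + (r - p) = r + 0 from by omega] at e1
  rw [← e2] at e1
  have h5 : r - p ≤ 5 := by omega
  have h1' : 1 ≤ r - p := by omega
  obtain ⟨d, hd⟩ : ∃ d, d = r - p := ⟨_, rfl⟩
  simp only [← hd] at e1 h5 h1'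
  interval_cases d <;> simp [pvSelKw] at e1

theorem pvFilter_split {l : List Nat} {P st : Nat} (hsort : l.Pairwise (· < ·)) (hP : P ∈ l)
    (hiff : ∀ q ∈ l, (st ≤ q ↔ q = P ∨ P + 6 ≤ q)) :
    l.filter (fun q => decide (st ≤ q)) = P :: l.filter (fun q => decide (P + 6 ≤ q)) := by
  induction l with
  | nil => simp at hP
  | cons a l ih =>
    rcases List.pairwise_cons.mp hsort with ⟨ha, hl⟩
    by_cases hap : a = P
    · subst hap
      have hst : st ≤ a := (hiff a (by simp)).mpr (Or.inl rfl)
      have hcong : l.filter (fun q => decide (st ≤ q)) = l.filter (fun q => decide (a + 6 ≤ q)) := by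
        apply List.filter_congr
        intro q hq
        have := hiff q (by simp [hq])
        have haq := ha q hq
        simp only [decide_eq_decide]
        constructor
        · intro h'; rcases this.mp h' with h'' | h'' <;> omega
        · intro h'; exact this.mpr (Or.inr h')
      simp [hst, hcong, show ¬ (a + 6 ≤ a) from by omega]
    · have hPl : P ∈ l := by 
        rcases List.mem_cons.mp hP with h | h
        · exact absurd h.symm hap
        · exact h
      have haP : a < P := ha P hPl
      have h1 : ¬ st ≤ a := by
        intro h'
        rcases (hiff a (by simp)).mp h' with h'' | h'' <;> omega
      have h2 : ¬ P + 6 ≤ a := by omega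
      simp only [List.filter_cons, decide_eq_true_eq, if_neg h1, if_neg h2]
      exact ih hl hPl (fun q hq => hiff q (by simp [hq]))

-- a prefix at a later offset is an infix of the earlier drop
theorem pvPrefix_infix_of_ge {u : List Char} {st p : Nat} (hst : st ≤ p)
    (hp : pvSelKw <+: u.drop p) : pvSelKw <:+: u.drop st := by
  have hd : u.drop p = (u.drop st).drop (p - st) := by rw [List.drop_drop]; congr 1; omega
  rw [hd] at hp
  exact hp.isInfix.trans (List.drop_suffix _ _).isInfix

-- A's find loop collects exactly the match positions ≥ start
theorem pvPositionsA_eq (q : List Char) : ∀ (n start : Nat), q.length - start = n → start ≤ q.length →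
    pvPositionsA (PySem.Chars.upper q) start
      = ((pvAllPos q).filter (fun p => decide (start ≤ p))).map Int.ofNat := by
  intro n
  induction n using Nat.strong_induction_on with
  | _ n ih =>
    intro start hn hle
    have hlen : (PySem.Chars.upper q).length = q.length := by simp [PySem.Chars.upper]
    rw [pvPositionsA]
    by_cases h : PySem.Chars.findFrom (PySem.Chars.upper q) pvSelKw (start : Int) none = -1
    · rw [dif_pos h]
      have hno : ¬ pvSelKw <:+: (PySem.Chars.upper q).drop start :=
        (PySem.Chars.findFrom_natCast_eq_neg_one_iff _ _ start (by omega)).mp h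
      have hnil : (pvAllPos q).filter (fun p => decide (start ≤ p)) = [] := by
        rw [List.filter_eq_nil_iff]
        intro p hp hstp
        have hsel : pvSelAt (q.drop p) = true := by
          simp only [pvAllPos, List.mem_filter] at hp
          exact hp.2
        exact hno (pvPrefix_infix_of_ge (by simpa using hstp) ((pvSelAt_iff q p).mp hsel))
      rw [hnil, List.map_nil]
    · rw [dif_neg h]
      obtain ⟨h1, h2, h3⟩ := PySem.Chars.findFrom_natCast_spec _ pvSelKw start (by omega) h
      have hpos0 : (0 : Int) ≤ PySem.Chars.findFrom (PySem.Chars.upper q) pvSelKw (start : Int) none :=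
        le_trans (Int.natCast_nonneg start) h1
      have hposP : PySem.Chars.findFrom (PySem.Chars.upper q) pvSelKw (start : Int) none
          = ((PySem.Chars.findFrom (PySem.Chars.upper q) pvSelKw (start : Int) none).toNat : Int) := by
        omega
      have hstP : start ≤ (PySem.Chars.findFrom (PySem.Chars.upper q) pvSelKw (start : Int) none).toNat := by
        omega
      have h6 : (PySem.Chars.findFrom (PySem.Chars.upper q) pvSelKw (start : Int) none).toNat + 6 ≤ q.length := by
        have hl := h2.length_le
        rw [List.length_drop, hlen, show pvSelKw.length = 6 from rfl] at hl
        omega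
      have hmem : (PySem.Chars.findFrom (PySem.Chars.upper q) pvSelKw (start : Int) none).toNat ∈ pvAllPos q := by
        simp only [pvAllPos, List.mem_filter, List.mem_range]
        exact ⟨by omega, (pvSelAt_iff q _).mpr h2⟩
      have hiff : ∀ x ∈ pvAllPos q, (start ≤ x ↔
          x = (PySem.Chars.findFrom (PySem.Chars.upper q) pvSelKw (start : Int) none).toNat ∨
          (PySem.Chars.findFrom (PySem.Chars.upper q) pvSelKw (start : Int) none).toNat + 6 ≤ x) := by
        intro x hx
        have hselx : pvSelKw <+: (PySem.Chars.upper q).drop x := by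
          refine (pvSelAt_iff q x).mp ?_
          simp only [pvAllPos, List.mem_filter] at hx
          exact hx.2
        constructor
        · intro hsx
          rcases lt_trichotomy x (PySem.Chars.findFrom (PySem.Chars.upper q) pvSelKw (start : Int) none).toNat
            with hlt | heq | hgt
          · exact absurd hselx (h3 x hsx hlt)
          · exact Or.inl heq
          · by_cases hx6 : (PySem.Chars.findFrom (PySem.Chars.upper q) pvSelKw (start : Int) none).toNat + 6 ≤ x
            · exact Or.inr hx6
            · exact (pvNoOverlap _ h2 hselx hgt (by omega)).elim
        · intro hx'
          rcases hx' with rfl | hx' <;> omega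
      rw [pvFilter_split (pvAllPos_pairwise q) hmem hiff]
      rw [ih (q.length - ((PySem.Chars.findFrom (PySem.Chars.upper q) pvSelKw (start : Int) none).toNat + 6))
        (by omega) _ rfl (by omega)]
      simp only [List.map_cons]
      congr 1

-- A's slicing loop + final append, over strictly increasing positions past prev
theorem pvLoopA_phase (q : List Char) (ps : List Nat) : ∀ (prev : Nat) (acc : List (List Char)),
    (∀ p ∈ ps, prev < p) → ps.Pairwise (· < ·) → (∀ p ∈ ps, p < q.length) → prev < q.length →
    (if (pvLoopA q (ps.map Int.ofNat) acc ((prev : Nat) : Int)).2 < PySem.Chars.len q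
     then (pvLoopA q (ps.map Int.ofNat) acc ((prev : Nat) : Int)).1
          ++ [PySem.Chars.strip (PySem.Chars.slice q (some (pvLoopA q (ps.map Int.ofNat) acc ((prev : Nat) : Int)).2) none)]
     else (pvLoopA q (ps.map Int.ofNat) acc ((prev : Nat) : Int)).1)
      = acc ++ (pvCutFrom q prev ps).map PySem.Chars.strip := by
  induction ps with
  | nil =>
    intro prev acc _ _ _ hprev
    simp only [List.map_nil, pvLoopA]
    have hlt : ((prev : Nat) : Int) < PySem.Chars.len q := by
      rw [PySem.Chars.len_eq]
      exact_mod_cast hprev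
    rw [if_pos hlt]
    simp [pvCutFrom, PySem.Chars.slice_eq_listSlice, PySem.List.slice_from_natCast]
  | cons p rest ih =>
    intro prev acc hlt hchain hlen hprev
    have hpp : ((prev : Nat) : Int) < Int.ofNat p := by
      rw [show Int.ofNat p = ((p : Nat) : Int) from rfl]
      exact_mod_cast hlt p (by simp)
    simp only [List.map_cons, pvLoopA, if_pos hpp]
    have hof : Int.ofNat p = ((p : Nat) : Int) := rfl
    rw [hof]
    rw [ih p _ (fun x hx => (List.pairwise_cons.mp hchain).1 x hx) (List.pairwise_cons.mp hchain).2
      (fun x hx => hlen x (by simp [hx])) (hlen p (by simp))]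
    rw [List.append_assoc]
    congr 1
    simp only [pvCutFrom, List.map_cons, List.singleton_append]
    congr 2
    rw [PySem.Chars.slice_eq_listSlice, PySem.List.slice_natCast]

-- A's core equals the cut-strip-drop normal form
theorem pvACore_eq (q : List Char) :
    pvSplitACore q
      = (if (pvCutFrom q 0 (pvAllPos q)).head? = some []
         then ((pvCutFrom q 0 (pvAllPos q)).map PySem.Chars.strip).tail
         else (pvCutFrom q 0 (pvAllPos q)).map PySem.Chars.strip) := by
  have hpos := pvPositionsA_eq q (q.length - 0) 0 rfl (Nat.zero_le _)
  have hfilter : (pvAllPos q).filter (fun p => decide (0 ≤ p)) = pvAllPos q := by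
    simp
  rw [hfilter] at hpos
  simp only [pvSplitACore]
  rw [hpos]
  rcases hall : pvAllPos q with - | ⟨p, ps⟩
  · simp only [List.map_nil, pvLoopA]
    by_cases hq : q = []
    · subst hq
      simp [pvCutFrom, PySem.Chars.len_eq]
    · have hlen0 : ((0 : Nat) : Int) < PySem.Chars.len q := by
        rw [PySem.Chars.len_eq]
        exact_mod_cast List.length_pos_iff.mpr hq
      rw [show ((0 : Int)) = ((0 : Nat) : Int) from rfl, if_pos hlen0, if_neg (by simp [pvCutFrom, hq])]
      simp [pvCutFrom, PySem.Chars.slice_eq_listSlice]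
  · have hpair : (p :: ps).Pairwise (· < ·) := hall ▸ pvAllPos_pairwise q
    have hlenall : ∀ x ∈ p :: ps, x < q.length := fun x hx => pvAllPos_lt q (hall ▸ hx)
    rcases Nat.eq_zero_or_pos p with rfl | hp0
    · have hnl : ¬ ((0 : Int) < Int.ofNat 0) := by decide
      simp only [List.map_cons, pvLoopA, if_neg hnl]
      have hph := pvLoopA_phase q ps 0 []
        (fun x hx => Nat.pos_of_ne_zero (by rintro rfl; exact (List.pairwise_cons.mp hpair).1 0 hx |>.false))
        (List.pairwise_cons.mp hpair).2 (fun x hx => hlenall x (by simp [hx])) (hlenall 0 (by simp))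
      rw [show (Int.ofNat 0) = (((0 : Nat)) : Int) from rfl, hph]
      rw [if_pos (by simp [pvCutFrom])]
      simp [pvCutFrom]
    · have hpl : ((0 : Int) < Int.ofNat p) := by
        rw [show Int.ofNat p = ((p : Nat) : Int) from rfl]
        exact_mod_cast hp0
      simp only [List.map_cons, pvLoopA, if_pos hpl]
      have hph := pvLoopA_phase q ps p
        ([] ++ [PySem.Chars.strip (PySem.Chars.slice q (some 0) (some (Int.ofNat p)))])
        (fun x hx => (List.pairwise_cons.mp hpair).1 x hx) (List.pairwise_cons.mp hpair).2
        (fun x hx => hlenall x (by simp [hx])) (hlenall p (by simp))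
      rw [show (Int.ofNat p) = (((p : Nat)) : Int) from rfl] at hph ⊢
      rw [hph]
      have hq : q ≠ [] := by
        have := hlenall p (by simp)
        intro h
        simp [h] at this
      rw [if_neg (by simp [pvCutFrom, List.take_eq_nil_iff, hq]; omega)]
      simp only [pvCutFrom, List.map_cons, List.nil_append, List.singleton_append, List.drop_zero,
        Nat.sub_zero]
      congr 2
      rw [show ((0 : Int)) = (((0 : Nat)) : Int) from rfl, PySem.Chars.slice_eq_listSlice,
        PySem.List.slice_natCast]
      simp

-- B's scanner, recursively, with the pending buffer factored out
def pvRawRef : List Char → List (List Char)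
  | [] => [[]]
  | c :: rs =>
      if pvSelAt (c :: rs) then [] :: (pvRawRef rs).modifyHead (c :: ·)
      else (pvRawRef rs).modifyHead (c :: ·)

theorem pvScanB_eq (rest : List Char) : ∀ cur,
    pvScanB rest cur = (pvRawRef rest).modifyHead (cur.reverse ++ ·) := by
  induction rest with
  | nil => intro cur; simp [pvScanB, pvRawRef]
  | cons c rs ih =>
    intro cur
    by_cases hs : pvSelAt (c :: rs)
    · simp only [pvScanB, pvRawRef, if_pos hs, ih, List.modifyHead_cons]
      simp
    · simp only [pvScanB, pvRawRef, if_neg hs, ih, List.modifyHead_modifyHead]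
      congr 1
      funext x
      simp [Function.comp]

theorem pvCut_cons (c : Char) (rs : List Char) (ps : List Nat) :
    pvCutFrom (c :: rs) 0 (ps.map (· + 1)) = (pvCutFrom rs 0 ps).modifyHead (c :: ·) := by
  have shift : ∀ (ps : List Nat) (prev : Nat),
      pvCutFrom (c :: rs) (prev + 1) (ps.map (· + 1)) = pvCutFrom rs prev ps := by
    intro ps
    induction ps with
    | nil => intro prev; simp [pvCutFrom]
    | cons p rest ih => intro prev; simp [pvCutFrom, ih, Nat.succ_sub_succ]
  cases ps with
  | nil => simp [pvCutFrom]
  | cons p rest => simp [pvCutFrom, shift]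

theorem pvAllPos_cons (c : Char) (rs : List Char) :
    pvAllPos (c :: rs)
      = (if pvSelAt (c :: rs) then [0] else []) ++ (pvAllPos rs).map (· + 1) := by
  simp only [pvAllPos, List.length_cons, List.range_succ_eq_map, List.filter_cons,
    List.filter_map, List.drop_zero]
  have h : ((fun i => pvSelAt ((c :: rs).drop i)) ∘ Nat.succ) = fun i => pvSelAt (rs.drop i) := by
    funext i; simp [Function.comp]
  rw [h]
  by_cases hs : pvSelAt (c :: rs) <;> simp [hs]

theorem pvRawRef_eq (q : List Char) : pvRawRef q = pvCutFrom q 0 (pvAllPos q) := by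
  induction q with
  | nil => simp [pvRawRef, pvAllPos, pvCutFrom]
  | cons c rs ih =>
    rw [pvAllPos_cons]
    by_cases hs : pvSelAt (c :: rs)
    · simp only [pvRawRef, if_pos hs, ih, List.singleton_append]
      rw [show ((0 : Nat) :: (pvAllPos rs).map (· + 1)) = [0] ++ (pvAllPos rs).map (· + 1) from rfl]
      simp only [List.singleton_append]
      rw [show pvCutFrom (c :: rs) 0 (0 :: (pvAllPos rs).map (· + 1))
            = ((c :: rs).drop 0).take (0 - 0) :: pvCutFrom (c :: rs) 0 ((pvAllPos rs).map (· + 1)) from rfl]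
      rw [pvCut_cons]
      simp
    · simp only [pvRawRef, if_neg hs, ih, List.nil_append]
      rw [pvCut_cons]

-- ===== VERDICT (by name: the statement is the Claim_ definition above) =====
theorem split_query_at_select_spec : Claim_equal_split_query_at_select := by
  intro query _
  show _ = _
  unfold split_query_at_select split_query_at_select_alt
  rw [pvScanB_eq, pvRawRef_eq, pvACore_eq]
  have hmod : ∀ (l : List (List Char)), l.modifyHead (fun x => List.reverse [] ++ x) = l := by
    intro l
    cases l <;> simp
  rw [hmod]
  by_cases hh : (pvCutFrom query.toList 0 (pvAllPos query.toList)).head? = some []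
  · rw [if_pos hh, if_pos hh]
    simp [List.map_tail, List.map_map, Function.comp_def]
  · rw [if_neg hh, if_neg hh]
    simp [List.map_map, Function.comp_def]
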